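-- pv_equiv track=rewrite | github.com/First-Peoples-Cultural-Council/fv-be | firstvoices/backend/search/utils.py | get_ids_by_type
-- ===== SOURCE A (Python) =====
-- def get_ids_by_type(search_results):
--     """Organizes model IDs of the search results by data type.
--
--     Returns: a dictionary where the keys are model names and the values are lists of ids
--     """
--     data = {}
--     for result in search_results:
--         model_name = result["_source"]["document_type"]
--         model_id = result["_source"]["document_id"]
--
--         if model_name not in data:
--             data[model_name] = []
--
--         data[model_name].append(model_id)
--     return data
-- ===== SOURCE B (Python) =====
-- def get_ids_by_type(search_results):
--     """Organizes model IDs of the search results by data type.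
--
--     Returns: a dictionary where the keys are model names and the values are lists of ids
--     """
--     pairs = [(r["_source"]["document_type"], r["_source"]["document_id"])
--              for r in search_results]
--
--     def group(pairs):
--         # partition recursion: peel off the first type's bucket, recurse on the rest
--         if not pairs:
--             return {}
--         t = pairs[0][0]
--         d = {t: [i for tt, i in pairs if tt == t]}
--         d.update(group([(tt, i) for tt, i in pairs if tt != t]))
--         return d
--
--     return group(pairs)
-- ===== Notes on version B (the rewrite author's own statement) =====
-- stated objective: alternative
-- what changed: A folds every result into one incrementally-grown dict, creating/appending per-type buckets inside a single loop; B extracts the flat (type, id) pair list and then groups it by partition recursion: it peels off the first type's complete bucket with one filter and recurses on the pairs of the remaining types, concatenating the buckets.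
import Mathlib
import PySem

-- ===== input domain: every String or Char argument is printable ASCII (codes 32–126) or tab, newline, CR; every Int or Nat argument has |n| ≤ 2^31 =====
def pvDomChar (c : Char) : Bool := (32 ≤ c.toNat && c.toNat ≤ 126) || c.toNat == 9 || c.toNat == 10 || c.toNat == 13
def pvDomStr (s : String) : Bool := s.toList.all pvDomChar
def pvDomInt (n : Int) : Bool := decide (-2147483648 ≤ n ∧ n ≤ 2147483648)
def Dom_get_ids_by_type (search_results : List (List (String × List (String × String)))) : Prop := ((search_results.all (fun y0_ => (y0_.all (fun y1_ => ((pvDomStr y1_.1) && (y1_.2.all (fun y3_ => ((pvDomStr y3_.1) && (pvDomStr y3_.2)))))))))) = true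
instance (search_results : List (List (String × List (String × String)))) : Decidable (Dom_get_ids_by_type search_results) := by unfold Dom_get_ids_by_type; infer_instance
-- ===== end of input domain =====

-- ===== PORT A =====
-- B regroups via partition recursion (peel one type's bucket, recurse on the rest) instead of A's incremental dict fold; same behaviour, alternative algorithm.
-- Python dicts appear as assoc lists in the signature; they are wrapped in PySem.Dict for lookups.
def get_ids_by_type (search_results : List (List (String × List (String × String)))) : List (String × List String) :=
  (search_results.foldl (fun data result =>
      let src := ((PySem.Dict.mk result).get? "_source").getD []
      let model_name := ((PySem.Dict.mk src).get? "document_type").getD ""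
      let model_id := ((PySem.Dict.mk src).get? "document_id").getD ""
      let data := if data.contains model_name then data else data.insert model_name []
      data.modify model_name [] (fun l => l ++ [model_id]))
    PySem.Dict.empty).items

-- ===== PORT B =====
-- group(pairs): the 'd = {t: bucket}; d.update(group(other-type pairs))' step is ported as a cons;
-- this is exact because t is filtered out of the recursive call, so the dict update only appends
-- fresh keys after the single entry (t, bucket).
def pvGroup : List (String × String) → List (String × List String)
  | [] => []
  | (t, i) :: rest =>
      (t, ((((t, i) :: rest).filter (fun p => p.1 == t)).map Prod.snd))
        :: pvGroup (((t, i) :: rest).filter (fun p => p.1 != t))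
  termination_by l => l.length
  decreasing_by
    simp
    exact List.length_filter_le _ _

def get_ids_by_type_alt (search_results : List (List (String × List (String × String)))) : List (String × List String) :=
  let pairs := search_results.map (fun r =>
      let src := ((PySem.Dict.mk r).get? "_source").getD []
      (((PySem.Dict.mk src).get? "document_type").getD "",
       ((PySem.Dict.mk src).get? "document_id").getD ""))
  pvGroup pairs

-- ===== PRECONDITION & SPEC =====
-- Pre_ excludes exactly the inputs on which the Python A raises KeyError: a result missing the
-- "_source" key, or a source missing "document_type" or "document_id".
def Pre_get_ids_by_type (search_results : List (List (String × List (String × String)))) : Prop :=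
  ∀ r ∈ search_results,
    ((PySem.Dict.mk r).get? "_source").isSome = true ∧
    ((PySem.Dict.mk (((PySem.Dict.mk r).get? "_source").getD [])).get? "document_type").isSome = true ∧
    ((PySem.Dict.mk (((PySem.Dict.mk r).get? "_source").getD [])).get? "document_id").isSome = true

instance (search_results : List (List (String × List (String × String)))) : Decidable (Pre_get_ids_by_type search_results) := by
  unfold Pre_get_ids_by_type; infer_instance

def pvWitness_get_ids_by_type : (List (List (String × List (String × String)))) :=
  [[("_source", [("document_type", "song"), ("document_id", "1")])],
   [("_source", [("document_type", "word"), ("document_id", "2")])],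
   [("_source", [("document_type", "song"), ("document_id", "3")])]]

def Spec_get_ids_by_type (search_results : List (List (String × List (String × String)))) (out : List (String × List String)) : Prop := out = get_ids_by_type_alt search_results
instance (search_results : List (List (String × List (String × String)))) (out : List (String × List String)) : Decidable (Spec_get_ids_by_type search_results out) := by unfold Spec_get_ids_by_type; infer_instance

-- ===== CLAIM (what is proved, stated in full; the proofs are below) =====
def Claim_equal_get_ids_by_type : Prop := ∀ (search_results : List (List (String × List (String × String)))), Dom_get_ids_by_type search_results → Pre_get_ids_by_type search_results → Spec_get_ids_by_type search_results (get_ids_by_type search_results)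

-- ===== LEMMAS AND PROOFS =====

-- A's loop body (conditional bucket creation + append) is one Dict.modify step.
theorem pvStep_eq_modify (d : PySem.Dict String (List String)) (k i : String) :
    ((if d.contains k then d else d.insert k []).modify k [] (fun l => l ++ [i]))
      = d.modify k [] (fun l => l ++ [i]) := by
  by_cases h : d.contains k = true
  · simp [h]
  · simp only [h, Bool.false_eq_true, if_false]
    simp only [PySem.Dict.modify]
    rw [PySem.Dict.getD_insert_self, PySem.Dict.insert_insert_self,
        PySem.Dict.getD_of_not_contains _ _ (by simp [h])]

-- the pair-extraction both ports share
def pvExtract (r : List (String × List (String × String))) : String × String :=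
  (((PySem.Dict.mk (((PySem.Dict.mk r).get? "_source").getD [])).get? "document_type").getD "",
   ((PySem.Dict.mk (((PySem.Dict.mk r).get? "_source").getD [])).get? "document_id").getD "")

theorem pvA_eq_pairs_fold (search_results : List (List (String × List (String × String)))) :
    get_ids_by_type search_results =
      ((search_results.map pvExtract).foldl
        (fun d p => d.modify p.1 [] (fun l => l ++ [p.2])) PySem.Dict.empty).items := by
  unfold get_ids_by_type
  rw [List.foldl_map]
  congr 1
  apply PySem.List.foldl_congr_mem
  intro d r _
  exact pvStep_eq_modify d _ _

-- dedup recursion: first occurrence kept, later ones filtered away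
theorem pvDedup_cons (x : String) (xs : List String) :
    PySem.List.dedup (x :: xs) = x :: (PySem.List.dedup xs).filter (fun y => y != x) := by
  simp only [PySem.List.dedup_eq_ofList]
  rw [show x :: xs = [x] ++ xs from rfl, PySem.Set.ofList_append]
  rw [show PySem.Set.ofList [x] = [x] from rfl]
  rw [PySem.Set.update_eq_append_filter]
  simp [PySem.Set.contains]
  apply List.filter_congr
  intro a _
  simp [bne]
  rfl

-- dedup commutes with filter
theorem pvDedup_filter (p : String → Bool) (l : List String) :
    PySem.List.dedup (l.filter p) = (PySem.List.dedup l).filter p := by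
  induction l with
  | nil => rfl
  | cons x xs ih =>
    rw [pvDedup_cons, List.filter_cons]
    by_cases hp : p x = true
    · rw [if_pos hp, pvDedup_cons, ih, List.filter_filter, List.filter_cons, if_pos hp,
          List.filter_filter]
      congr 1
      apply List.filter_congr
      intro a _
      rw [Bool.and_comm]
    · rw [if_neg (by simp [hp]), ih, List.filter_cons, if_neg (by simp [hp]), List.filter_filter]
      apply List.filter_congr
      intro a _
      by_cases ha : p a = true
      · have : a ≠ x := fun h => hp (h ▸ ha)
        simp [ha, this]
      · simp [ha]

theorem pvMapFst_filter (t : String) (pairs : List (String × String)) :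
    ((pairs.filter (fun q => q.1 != t)).map Prod.fst) = (pairs.map Prod.fst).filter (fun y => y != t) := by
  induction pairs with
  | nil => rfl
  | cons q rest ih => by_cases h : (q.1 != t) = true <;> simp [h, ih]

-- A's dedup-map characterisation equals B's partition recursion
theorem pvGroup_eq (pairs : List (String × String)) :
    (PySem.List.dedup (pairs.map Prod.fst)).map
      (fun t => (t, (pairs.filter (fun p => p.1 == t)).map Prod.snd)) = pvGroup pairs := by
  induction pairs using pvGroup.induct with
  | case1 => simp [pvGroup]
  | case2 t i rest ih =>
    rw [pvGroup, List.map_cons, pvDedup_cons, List.map_cons]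
    have hrest : (((t, i) :: rest).filter (fun p => p.1 != t)) = rest.filter (fun p => p.1 != t) := by
      simp
    congr 1
    rw [hrest] at ih ⊢
    rw [← ih, pvMapFst_filter, pvDedup_filter]
    apply List.map_congr_left
    intro t' ht'
    have hne : (t' != t) = true := (List.mem_filter.mp ht').2
    have hne' : t' ≠ t := by simpa [bne] using hne
    congr 1
    have h1 : (((t, i) :: rest).filter (fun p => p.1 == t')) = rest.filter (fun p => p.1 == t') := by
      simp [(by simp [Ne.symm hne'] : ((t, i).1 == t') = false)]
    rw [h1, List.filter_filter]
    congr 1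
    apply List.filter_congr
    intro a _
    by_cases ha : (a.1 == t') = true
    · have : a.1 ≠ t := by have := eq_of_beq ha; rw [this]; exact hne'
      simp [ha, this]
    · simp [ha]

theorem pvAlt_eq (search_results : List (List (String × List (String × String)))) :
    get_ids_by_type_alt search_results = pvGroup (search_results.map pvExtract) := rfl

theorem get_ids_by_type_spec : Claim_equal_get_ids_by_type := by
  intro search_results _ _
  unfold Spec_get_ids_by_type
  rw [pvA_eq_pairs_fold, pvAlt_eq]
  set pairs := search_results.map pvExtract with hp
  have hnd : ((pairs.foldl (fun d p => d.modify p.1 [] (fun l => l ++ [p.2])) PySem.Dict.empty)).keys.Nodup := by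
    exact PySem.Dict.nodup_keys_foldl_modify_key pairs Prod.fst [] (fun d p => (fun l => l ++ [p.2])) PySem.Dict.empty (by simp)
  rw [PySem.Dict.items_eq_map_keys _ hnd []]
  have hkeys : ((pairs.foldl (fun d p => d.modify p.1 [] (fun l => l ++ [p.2])) PySem.Dict.empty)).keys
      = PySem.List.dedup (pairs.map Prod.fst) := by
    rw [PySem.Dict.keys_foldl_modify_key pairs Prod.fst]
    simp [PySem.Dict.keys_empty, PySem.Set.update_nil_left, PySem.List.dedup]
  rw [hkeys, ← pvGroup_eq pairs]
  apply List.map_congr_left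
  intro t _
  have := PySem.Dict.getD_foldl_modify_append pairs PySem.Dict.empty t
  simp only [PySem.Dict.getD_empty] at this
  simp only [this, List.nil_append]
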